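-- pv_equiv track=rewrite | github.com/FabricioMenegolo/Compasso | Azimute/Sprint_4/0_Exercicios.py | conta_vogais
-- ===== SOURCE A (Python) =====
-- def conta_vogais(texto:str)-> int:
--   vogais = ['a', 'e', 'i', 'o', 'u']
--   filtro = list(filter(lambda x: x in vogais, texto.lower()))
--   frequencia_vogais = {}
--   for i in range(len(filtro)):
--     vogal = filtro[i]
--     if vogal in frequencia_vogais:
--       frequencia_vogais[vogal] += 1
--     else:
--       frequencia_vogais[vogal] = 1
--   soma = sum(frequencia_vogais.values())
--   return soma
-- ===== SOURCE B (Python) =====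
-- def conta_vogais(texto: str) -> int:
--     total = 0
--     for c in texto.lower():
--         if c in 'aeiou':
--             total += 1
--     return total
-- ===== Notes on version B (the rewrite author's own statement) =====
-- stated objective: simpler
-- what changed: B drops A's filter-then-frequency-dictionary-then-sum pipeline and counts vowels directly with one accumulator pass over the lowercased string (no intermediate list or dict is built).
import Mathlib
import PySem

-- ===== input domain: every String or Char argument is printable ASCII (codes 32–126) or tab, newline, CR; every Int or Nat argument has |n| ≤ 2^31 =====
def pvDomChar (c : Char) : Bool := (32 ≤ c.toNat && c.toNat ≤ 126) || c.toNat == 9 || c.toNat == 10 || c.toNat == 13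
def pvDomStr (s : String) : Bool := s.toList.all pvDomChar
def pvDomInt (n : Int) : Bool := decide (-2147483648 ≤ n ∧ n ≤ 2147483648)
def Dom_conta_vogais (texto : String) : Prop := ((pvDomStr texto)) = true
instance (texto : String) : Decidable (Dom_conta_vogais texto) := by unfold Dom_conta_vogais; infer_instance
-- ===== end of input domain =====

-- B replaces A's filter + per-vowel frequency dict + sum-of-values with one direct counting pass (simpler).

-- ===== PORT A =====
-- the index i ranges over range(len(filtro)), so filtro[i] is always in range; ported with pyGetD (default never used)
def conta_vogais (texto : String) : Int :=
  let vogais : List Char := ['a', 'e', 'i', 'o', 'u']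
  let filtro : List Char := (PySem.Str.lower texto).toList.filter (fun x => vogais.contains x)
  let frequencia_vogais : PySem.Dict Char Int :=
    (PySem.List.pyRange 0 (PySem.List.len filtro)).foldl
      (fun d i =>
        let vogal := PySem.List.pyGetD filtro i 'a'
        if d.contains vogal then d.insert vogal (d.getD vogal 0 + 1)
        else d.insert vogal 1)
      PySem.Dict.empty
  frequencia_vogais.values.sum

-- ===== PORT B =====
def conta_vogais_alt (texto : String) : Int :=
  (PySem.Str.lower texto).toList.foldl
    (fun total c => if "aeiou".toList.contains c then total + 1 else total) 0

-- ===== PRECONDITION & SPEC =====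
def Spec_conta_vogais (texto : String) (out : Int) : Prop := out = conta_vogais_alt texto
instance (texto : String) (out : Int) : Decidable (Spec_conta_vogais texto out) := by unfold Spec_conta_vogais; infer_instance

-- ===== CLAIM (what is proved, stated in full; the proofs are below) =====
def Claim_equal_conta_vogais : Prop := ∀ (texto : String), Dom_conta_vogais texto → Spec_conta_vogais texto (conta_vogais texto)

-- ===== LEMMAS AND PROOFS =====

-- A's two loop branches are both the canonical counter step
theorem pv_body_eq (d : PySem.Dict Char Int) (v : Char) :
    (if d.contains v then d.insert v (d.getD v 0 + 1) else d.insert v 1)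
      = d.insert v (d.getD v 0 + 1) := by
  by_cases h : d.contains v = true
  · simp [h]
  · have h' : d.contains v = false := by simpa using h
    rw [PySem.Dict.getD_of_not_contains _ _ h']
    simp [h']

-- summing each distinct element's multiplicity recovers the length
theorem pv_sum_count (l : List Char) :
    (((PySem.Set.ofList l).map (fun k => (List.count k l : Int))).sum) = (l.length : Int) := by
  have hnd : (PySem.Set.ofList l).Nodup := PySem.Set.nodup_ofList l
  have hfs : (PySem.Set.ofList l).toFinset = l.toFinset := by
    ext x; simp [PySem.Set.mem_ofList]
  have h1 : ((PySem.Set.ofList l).map (fun k => (List.count k l : Int))).sum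
      = ∑ a ∈ (PySem.Set.ofList l).toFinset, (List.count a l : Int) :=
    (List.sum_toFinset _ hnd).symm
  rw [h1, hfs]
  have h2 : ∑ a ∈ l.toFinset, (List.count a l : Int)
      = ((∑ a ∈ l.toFinset, List.count a l : ℕ) : Int) := by push_cast; rfl
  rw [h2]
  have h3 : ∑ a ∈ l.toFinset, List.count a l = l.length := by
    have := Multiset.toFinset_sum_count_eq (l : Multiset Char)
    simpa using this
  rw [h3]

-- A's range-indexed dict loop followed by sum-of-values yields the length of filtro
theorem pv_A_sum (filtro : List Char) :
    (((PySem.List.pyRange 0 (PySem.List.len filtro)).foldl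
      (fun d i =>
        if d.contains (PySem.List.pyGetD filtro i 'a') then
          d.insert (PySem.List.pyGetD filtro i 'a')
            (d.getD (PySem.List.pyGetD filtro i 'a') 0 + 1)
        else d.insert (PySem.List.pyGetD filtro i 'a') 1)
      PySem.Dict.empty).values.sum) = (filtro.length : Int) := by
  have hb : (fun (d : PySem.Dict Char Int) (vogal : Char) =>
      if d.contains vogal then d.insert vogal (d.getD vogal 0 + 1)
      else d.insert vogal 1)
      = fun d vogal => d.insert vogal (d.getD vogal 0 + 1) := by
    funext d v; exact pv_body_eq d v
  have h := PySem.List.foldl_pyRange_pyGetD filtro 'a'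
    (fun (d : PySem.Dict Char Int) vogal =>
      if d.contains vogal then d.insert vogal (d.getD vogal 0 + 1)
      else d.insert vogal 1)
    PySem.Dict.empty (le_refl 0)
  simp only [Int.toNat_zero, List.drop_zero] at h
  have h2 : List.foldl (fun (d : PySem.Dict Char Int) vogal =>
      if d.contains vogal then d.insert vogal (d.getD vogal 0 + 1)
      else d.insert vogal 1) PySem.Dict.empty filtro = PySem.Dict.counter filtro := by
    rw [hb]
    exact PySem.Dict.foldl_insert_getD_add_one_eq_counter filtro
  have hsum : (PySem.Dict.counter filtro).values.sum = (filtro.length : Int) := by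
    rw [PySem.Dict.values_eq_map_keys _ (PySem.Dict.nodup_keys_counter filtro) 0,
        PySem.Dict.keys_counter]
    simpa [PySem.Dict.getD_counter] using pv_sum_count filtro
  exact (congrArg (fun d => (PySem.Dict.values d).sum) (h.trans h2)).trans hsum

-- B's accumulator fold counts the matching characters
theorem pv_fold_count (l : List Char) (init : Int) :
    l.foldl (fun total c => if "aeiou".toList.contains c then total + 1 else total) init
      = init + (l.countP (fun c => "aeiou".toList.contains c) : Int) := by
  induction l generalizing init with
  | nil => simp
  | cons a t ih =>
    rw [List.foldl_cons, ih, List.countP_cons]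
    by_cases h : "aeiou".toList.contains a = true
    · rw [if_pos h, if_pos h]; push_cast; ring
    · rw [if_neg h, if_neg h]; push_cast; ring

-- ===== VERDICT (by name: the statement is the Claim_ definition above) =====
theorem conta_vogais_spec : Claim_equal_conta_vogais := by
  intro texto _
  unfold Spec_conta_vogais conta_vogais conta_vogais_alt
  have hv : "aeiou".toList = ['a', 'e', 'i', 'o', 'u'] := rfl
  rw [pv_A_sum, pv_fold_count (PySem.Str.lower texto).toList 0, hv]
  rw [← List.countP_eq_length_filter]
  ring
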